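-- pv_equiv track=rewrite | github.com/daviH98/Mapeamento-Memoria-Cache | src/cache_substituicao_sem_comentarios.py | simular_mru
-- ===== SOURCE A (Python) =====
-- from typing import List, Tuple
--
-- def simular_mru(sequencia: List[int], quadros: int) -> List[int]:
--     memoria = [None] * quadros
--     ultima_vez_usado = {}
--     tempo = 0
--     for pagina in sequencia:
--         tempo += 1
--         if pagina in memoria:
--             ultima_vez_usado[pagina] = tempo
--         else:
--             if None in memoria:
--                 pos = memoria.index(None)
--                 memoria[pos] = pagina
--                 ultima_vez_usado[pagina] = tempo
--             else:
--                 pagina_mru = max(ultima_vez_usado, key=ultima_vez_usado.get)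
--                 pos = memoria.index(pagina_mru)
--                 del ultima_vez_usado[pagina_mru]
--                 memoria[pos] = pagina
--                 ultima_vez_usado[pagina] = tempo
--     return memoria
-- ===== SOURCE B (Python) =====
-- from typing import List
--
-- def simular_mru(sequencia: List[int], quadros: int) -> List[int]:
--     # O(n): track the MRU page in a variable, page->frame-index dict, fill pointer.
--     frames = [None] * quadros
--     pos = {}
--     fill = 0
--     mru = None
--     for p in sequencia:
--         if p in pos:
--             mru = p
--         else:
--             if fill < quadros:
--                 frames[fill] = p
--                 pos[p] = fill
--                 fill += 1
--             else:
--                 i = pos.pop(mru)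
--                 frames[i] = p
--                 pos[p] = i
--             mru = p
--     return frames
-- ===== Notes on version B (the rewrite author's own statement) =====
-- stated objective: faster
-- what changed: Replaced the per-access linear scans of the frame list and the max() over the last-use dict with O(1) state: a page->frame-index dict, a fill pointer for the next free frame, and a single variable tracking the MRU page.
import Mathlib
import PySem

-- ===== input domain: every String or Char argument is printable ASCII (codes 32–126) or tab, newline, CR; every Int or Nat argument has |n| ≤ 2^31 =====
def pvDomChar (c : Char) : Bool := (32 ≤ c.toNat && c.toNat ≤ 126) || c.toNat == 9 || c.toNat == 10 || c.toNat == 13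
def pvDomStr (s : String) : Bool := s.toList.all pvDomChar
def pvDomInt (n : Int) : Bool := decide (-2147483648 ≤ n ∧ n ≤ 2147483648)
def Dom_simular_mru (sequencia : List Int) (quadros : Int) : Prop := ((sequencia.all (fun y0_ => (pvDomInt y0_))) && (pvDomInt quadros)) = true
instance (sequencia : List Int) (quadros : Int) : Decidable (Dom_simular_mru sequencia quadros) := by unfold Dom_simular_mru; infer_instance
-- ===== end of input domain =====

-- B replaces A's per-access linear scans (page in memoria, memoria.index, max over the
-- last-use dict) with O(1) bookkeeping: a page->frame-index dict, a fill pointer and a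
-- single variable holding the MRU page.

-- ===== PORT A =====
-- loop body of A: state (memoria, ultima_vez_usado, tempo)
def simular_mru_step (st : List (Option Int) × PySem.Dict Int Int × Int) (pagina : Int) :
    List (Option Int) × PySem.Dict Int Int × Int :=
  let mem := st.1
  let ult := st.2.1
  let tempo := st.2.2 + 1
  if some pagina ∈ mem then
    (mem, ult.insert pagina tempo, tempo)
  else if (none : Option Int) ∈ mem then
    -- memoria.index(None): the membership test just above guarantees Python's .index returns
    let pos := (PySem.List.index? mem none).getD 0
    (mem.set pos (some pagina), ult.insert pagina tempo, tempo)
  else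
    -- max(ultima_vez_usado, key=ultima_vez_usado.get): first key with maximal value
    match PySem.List.max? ult.keys (fun k => ult.getD k 0) with
    | none => (mem, ult, tempo)  -- Python raises ValueError (max of empty dict); outside Pre_
    | some m =>
      -- memoria.index(pagina_mru): pagina_mru is in memoria, .index returns
      let pos := (PySem.List.index? mem (some m)).getD 0
      (mem.set pos (some pagina), (ult.erase m).insert pagina tempo, tempo)

def simular_mru (sequencia : List Int) (quadros : Int) : List (Option Int) :=
  -- [None] * quadros: empty for quadros ≤ 0, exactly Int.toNat
  (sequencia.foldl simular_mru_step (List.replicate quadros.toNat none, PySem.Dict.empty, 0)).1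

-- ===== PORT B =====
-- loop body of B: state (frames, pos, fill, mru)
def simular_mru_alt_step (quadros : Int)
    (st : List (Option Int) × PySem.Dict Int Int × Int × Option Int) (p : Int) :
    List (Option Int) × PySem.Dict Int Int × Int × Option Int :=
  let frames := st.1
  let pos := st.2.1
  let fill := st.2.2.1
  if pos.contains p then
    (frames, pos, fill, some p)
  else if fill < quadros then
    (frames.set fill.toNat (some p), pos.insert p fill, fill + 1, some p)
  else
    -- i = pos.pop(mru)
    match st.2.2.2 with
    | none => st  -- Python raises KeyError (pop of None, never stored); outside Pre_
    | some m =>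
      match pos.get? m with
      | none => st  -- Python raises KeyError; unreachable while mru is a resident page
      | some i => (frames.set i.toNat (some p), (pos.erase m).insert p i, fill, some p)

def simular_mru_alt (sequencia : List Int) (quadros : Int) : List (Option Int) :=
  (sequencia.foldl (simular_mru_alt_step quadros)
    (List.replicate quadros.toNat none, PySem.Dict.empty, 0, none)).1

-- ===== PRECONDITION & SPEC =====
-- Pre_ excludes only inputs on which BOTH programs raise: a nonempty sequencia with
-- quadros ≤ 0 makes A raise ValueError (max of an empty dict) and B raise KeyError.
def Pre_simular_mru (sequencia : List Int) (quadros : Int) : Prop :=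
  sequencia = [] ∨ 1 ≤ quadros
instance (sequencia : List Int) (quadros : Int) : Decidable (Pre_simular_mru sequencia quadros) := by
  unfold Pre_simular_mru; infer_instance

def pvWitness_simular_mru : List Int × Int := ([1, 2, 3, 1, 4], 2)

def Spec_simular_mru (sequencia : List Int) (quadros : Int) (out : List (Option Int)) : Prop := out = simular_mru_alt sequencia quadros
instance (sequencia : List Int) (quadros : Int) (out : List (Option Int)) : Decidable (Spec_simular_mru sequencia quadros out) := by unfold Spec_simular_mru; infer_instance

-- ===== CLAIM (what is proved, stated in full; the proofs are below) =====
def Claim_equal_simular_mru : Prop := ∀ (sequencia : List Int) (quadros : Int), Dom_simular_mru sequencia quadros → Pre_simular_mru sequencia quadros → Spec_simular_mru sequencia quadros (simular_mru sequencia quadros)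

-- ===== LEMMAS AND PROOFS =====

-- dict lemmas about erase (not provided by the prelude), Python max with a key,
-- and list.index by a pointwise characterisation
theorem dict_get?_erase (d : PySem.Dict Int Int) (k k' : Int) :
    (d.erase k).get? k' = if k' = k then none else d.get? k' := by
  obtain ⟨items⟩ := d
  induction items with
  | nil => simp [PySem.Dict.erase, PySem.Dict.get?]
  | cons x t ih =>
    simp only [PySem.Dict.erase, PySem.Dict.get?, List.filter_cons, List.find?_cons] at ih ⊢
    rcases eq_or_ne x.1 k with hx | hx <;> rcases eq_or_ne k' k with hk | hk <;>
      rcases eq_or_ne x.1 k' with hx' | hx' <;> simp_all <;>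
      (try cases hbe : k == k' <;> try cases hbe2 : x.1 == k') <;> simp_all

theorem dict_nodup_keys_erase (d : PySem.Dict Int Int) (k : Int) (h : d.keys.Nodup) :
    (d.erase k).keys.Nodup := by
  have hs : (d.erase k).items.Sublist d.items := List.filter_sublist
  exact ((hs.map Prod.fst)).nodup h

theorem max?_unique (l : List Int) (key : Int → Int) (m : Int) (hm : m ∈ l)
    (hdom : ∀ p ∈ l, p ≠ m → key p < key m) :
    PySem.List.max? l key = some m := by
  cases h : PySem.List.max? l key with
  | none =>
    rw [(PySem.List.max?_eq_none_iff l key).mp h] at hm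
    simp at hm
  | some m' =>
    have hm' : m' ∈ l := PySem.List.max?_mem h
    have hle : key m ≤ key m' := PySem.List.max?_isMax h m hm
    by_cases he : m' = m
    · rw [he]
    · exact absurd hle (not_le.mpr (hdom m' hm' he))

theorem index?_eq_some_of_getElem (l : List (Option Int)) (v : Option Int) (j : Nat)
    (h1 : l[j]? = some v) (h2 : ∀ i, i < j → l[i]? ≠ some v) :
    PySem.List.index? l v = some j := by
  induction l generalizing j with
  | nil => simp at h1
  | cons x t ih =>
    cases j with
    | zero =>
      simp at h1; subst h1
      exact PySem.List.index?_cons_self x t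
    | succ n =>
      have hx : x ≠ v := by
        intro e; exact h2 0 (Nat.succ_pos n) (by simp [e])
      rw [PySem.List.index?_cons_of_ne t hx, ih n (by simpa using h1)
        (fun i hi => by simpa using h2 (i+1) (Nat.succ_lt_succ hi))]
      rfl

-- the joint invariant carried through both loops
def MruInv (q : Nat) (a : List (Option Int) × PySem.Dict Int Int × Int)
    (b : List (Option Int) × PySem.Dict Int Int × Int × Option Int) : Prop :=
  ∃ filled : List Int,
    b.1 = a.1 ∧
    a.1.length = q ∧
    filled.length ≤ q ∧
    filled.Nodup ∧
    b.2.2.1 = (filled.length : Int) ∧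
    (∀ i : Nat, i < q → a.1[i]? = if i < filled.length then (filled[i]?).map some else some none) ∧
    (∀ p : Int, b.2.1.contains p = true ↔ p ∈ filled) ∧
    (∀ (p i : Int), b.2.1.get? p = some i → 0 ≤ i ∧ i.toNat < filled.length ∧ filled[i.toNat]? = some p) ∧
    (∀ p : Int, a.2.1.contains p = true ↔ p ∈ filled) ∧
    a.2.1.keys.Nodup ∧
    (∀ (p t : Int), a.2.1.get? p = some t → t ≤ a.2.2) ∧
    (filled ≠ [] → ∃ m tm, b.2.2.2 = some m ∧ a.2.1.get? m = some tm ∧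
      ∀ (p t : Int), a.2.1.get? p = some t → p ≠ m → t < tm)

theorem mru_step (quadros : Int) (hq : 1 ≤ quadros) (a : List (Option Int) × PySem.Dict Int Int × Int)
    (b : List (Option Int) × PySem.Dict Int Int × Int × Option Int) (p : Int)
    (h : MruInv quadros.toNat a b) :
    MruInv quadros.toNat (simular_mru_step a p) (simular_mru_alt_step quadros b p) := by
  obtain ⟨mem, ult, tempo⟩ := a
  obtain ⟨frames, pos, fill, mru⟩ := b
  obtain ⟨filled, hfr, hlen, hle, hnd, hfill, hmem, hposc, hposg, hultc, hunk, htmp, hdom⟩ := h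
  simp only at hfr hlen hfill hmem hposc hposg hultc hunk htmp hdom
  have hquad : ((quadros.toNat : Int)) = quadros := Int.toNat_of_nonneg (by omega)
  have hq1 : 1 ≤ quadros.toNat := by omega
  -- membership in memoria ↔ membership in the abstract filled list
  have memiff : ∀ p' : Int, (some p' ∈ mem ↔ p' ∈ filled) := by
    intro p'
    constructor
    · intro hmem'
      obtain ⟨i, hi⟩ := List.mem_iff_getElem?.mp hmem'
      have hiq : i < quadros.toNat := by
        by_contra hge
        rw [List.getElem?_eq_none (by omega)] at hi
        simp at hi
      rw [hmem i hiq] at hi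
      by_cases hik : i < filled.length
      · rw [if_pos hik] at hi
        exact List.mem_iff_getElem?.mpr ⟨i, by
          cases hfi : filled[i]? with
          | none => rw [hfi] at hi; simp at hi
          | some y => rw [hfi] at hi; simp at hi; simp [hi]⟩
      · rw [if_neg hik] at hi; simp at hi
    · intro hf
      obtain ⟨i, hi⟩ := List.mem_iff_getElem?.mp hf
      have hik : i < filled.length := by
        by_contra hge
        rw [List.getElem?_eq_none (by omega)] at hi
        simp at hi
      refine List.mem_iff_getElem?.mpr ⟨i, ?_⟩
      rw [hmem i (by omega), if_pos hik, hi]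
      rfl
  have noneiff : ((none : Option Int) ∈ mem ↔ filled.length < quadros.toNat) := by
    constructor
    · intro hmem'
      obtain ⟨i, hi⟩ := List.mem_iff_getElem?.mp hmem'
      have hiq : i < quadros.toNat := by
        by_contra hge
        rw [List.getElem?_eq_none (by omega)] at hi
        simp at hi
      rw [hmem i hiq] at hi
      by_cases hik : i < filled.length
      · rw [if_pos hik] at hi
        cases hfi : filled[i]? with
        | none =>
          rw [List.getElem?_eq_none_iff] at hfi
          omega
        | some y => rw [hfi] at hi; simp at hi
      · rw [if_neg hik] at hi; omega
    · intro hk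
      refine List.mem_iff_getElem?.mpr ⟨filled.length, ?_⟩
      rw [hmem filled.length hk, if_neg (by omega)]
  by_cases hin : p ∈ filled
  · -- HIT: page already resident
    have hA : simular_mru_step (mem, ult, tempo) p = (mem, ult.insert p (tempo + 1), tempo + 1) := by
      simp only [simular_mru_step]
      rw [if_pos ((memiff p).mpr hin)]
    have hB : simular_mru_alt_step quadros (frames, pos, fill, mru) p = (frames, pos, fill, some p) := by
      simp only [simular_mru_alt_step]
      rw [if_pos ((hposc p).mpr hin)]
    rw [hA, hB]
    simp only [MruInv]
    refine ⟨filled, hfr, hlen, hle, hnd, hfill, hmem, hposc, hposg, ?_, ?_, ?_, ?_⟩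
    · intro q'
      rw [PySem.Dict.contains_insert]
      constructor
      · intro h'
        rcases Bool.or_eq_true_iff.mp h' with h' | h'
        · rw [show q' = p from by simpa using h']; exact hin
        · exact (hultc q').mp h'
      · intro h'
        by_cases he : q' = p
        · simp [he]
        · exact Bool.or_eq_true_iff.mpr (Or.inr ((hultc q').mpr h'))
    · exact PySem.Dict.nodup_keys_insert ult p (tempo + 1) hunk
    · intro p' t h'
      rw [PySem.Dict.get?_insert] at h'
      by_cases he : p' = p
      · rw [if_pos he] at h'
        have := Option.some.inj h'
        omega
      · rw [if_neg he] at h'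
        have := htmp p' t h'
        omega
    · intro _
      refine ⟨p, tempo + 1, rfl, by rw [PySem.Dict.get?_insert, if_pos rfl], ?_⟩
      intro p' t h' hne
      rw [PySem.Dict.get?_insert, if_neg hne] at h'
      have := htmp p' t h'
      omega
  · -- MISS
    have hnotmem : ¬ (some p ∈ mem) := fun h' => hin ((memiff p).mp h')
    have hposf : pos.contains p = false := by
      cases hc : pos.contains p
      · rfl
      · exact absurd ((hposc p).mp hc) hin
    by_cases hfree : filled.length < quadros.toNat
    · -- free frame available
      have hidx : PySem.List.index? mem none = some filled.length := by
        apply index?_eq_some_of_getElem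
        · rw [hmem filled.length hfree, if_neg (by omega)]
        · intro i hij
          rw [hmem i (by omega), if_pos hij]
          cases hfi : filled[i]? with
          | none => rw [List.getElem?_eq_none_iff] at hfi; omega
          | some y => simp
      have hA : simular_mru_step (mem, ult, tempo) p =
          (mem.set filled.length (some p), ult.insert p (tempo + 1), tempo + 1) := by
        simp only [simular_mru_step]
        rw [if_neg hnotmem, if_pos (noneiff.mpr hfree), hidx]
        rfl
      have hB : simular_mru_alt_step quadros (frames, pos, fill, mru) p =
          (frames.set filled.length (some p), pos.insert p fill, fill + 1, some p) := by
        simp only [simular_mru_alt_step]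
        rw [hposf]
        simp only [Bool.false_eq_true, if_false]
        rw [if_pos (by rw [hfill]; omega), hfill]
        simp
      rw [hA, hB]
      simp only [MruInv]
      refine ⟨filled ++ [p], by rw [hfr], by simp [hlen], by simp; omega,
        by simp [List.nodup_append, hnd]; exact fun a ha e => hin (e ▸ ha), by simp [hfill], ?_, ?_, ?_, ?_, ?_, ?_, ?_⟩
      · intro i hiq
        rw [List.getElem?_set]
        by_cases he : filled.length = i
        · rw [if_pos he, if_pos (by omega), if_pos (by simp; omega)]
          rw [← he, List.getElem?_concat_length]
          rfl
        · rw [if_neg he, hmem i hiq]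
          by_cases hik : i < filled.length
          · rw [if_pos hik, if_pos (by simp; omega), List.getElem?_append_left hik]
          · rw [if_neg hik, if_neg (by simp; omega)]
      · intro q'
        rw [PySem.Dict.contains_insert]
        constructor
        · intro h'
          rcases Bool.or_eq_true_iff.mp h' with h' | h'
          · simp [show q' = p from by simpa using h']
          · simp [(hposc q').mp h']
        · intro h'
          rcases List.mem_append.mp h' with h' | h'
          · exact Bool.or_eq_true_iff.mpr (Or.inr ((hposc q').mpr h'))
          · simp [List.mem_singleton.mp h']
      · intro q' i h'
        rw [PySem.Dict.get?_insert] at h'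
        by_cases he : q' = p
        · rw [if_pos he] at h'
          have hi : i = fill := by exact (Option.some.inj h').symm
          subst hi
          rw [hfill]
          refine ⟨by omega, by simp, ?_⟩
          have : ((filled.length : Int)).toNat = filled.length := by omega
          rw [this, he]
          exact List.getElem?_concat_length
        · rw [if_neg he] at h'
          obtain ⟨h0, hlt, hget⟩ := hposg q' i h'
          exact ⟨h0, by simp; omega, by rw [List.getElem?_append_left hlt, hget]⟩
      · intro q'
        rw [PySem.Dict.contains_insert]
        constructor
        · intro h'
          rcases Bool.or_eq_true_iff.mp h' with h' | h'
          · simp [show q' = p from by simpa using h']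
          · simp [(hultc q').mp h']
        · intro h'
          rcases List.mem_append.mp h' with h' | h'
          · exact Bool.or_eq_true_iff.mpr (Or.inr ((hultc q').mpr h'))
          · simp [List.mem_singleton.mp h']
      · exact PySem.Dict.nodup_keys_insert ult p (tempo + 1) hunk
      · intro p' t h'
        rw [PySem.Dict.get?_insert] at h'
        by_cases he : p' = p
        · rw [if_pos he] at h'
          have := Option.some.inj h'
          omega
        · rw [if_neg he] at h'
          have := htmp p' t h'
          omega
      · intro _
        refine ⟨p, tempo + 1, rfl, by rw [PySem.Dict.get?_insert, if_pos rfl], ?_⟩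
        intro p' t h' hne
        rw [PySem.Dict.get?_insert, if_neg hne] at h'
        have := htmp p' t h'
        omega
    · -- EVICTION: memory full, replace the MRU page
      have hkq : filled.length = quadros.toNat := by omega
      have hne : filled ≠ [] := by
        intro e
        rw [e] at hkq
        simp at hkq
        omega
      obtain ⟨m, tm, hmru, hgm, hdm⟩ := hdom hne
      have hmf : m ∈ filled := (hultc m).mp (by rw [PySem.Dict.contains_eq_isSome_get?, hgm]; rfl)
      have hmax : PySem.List.max? ult.keys (fun k => ult.getD k 0) = some m := by
        apply max?_unique
        · exact (PySem.Dict.contains_iff_mem_keys ult m).mp ((hultc m).mpr hmf)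
        · intro x hx hxm
          have hcx : ult.contains x = true := (PySem.Dict.contains_iff_mem_keys ult x).mpr hx
          rw [PySem.Dict.contains_eq_isSome_get?] at hcx
          obtain ⟨tx, htx⟩ := Option.isSome_iff_exists.mp hcx
          rw [PySem.Dict.getD_eq_get?_getD, PySem.Dict.getD_eq_get?_getD, htx, hgm]
          exact hdm x tx htx hxm
      have hposm : pos.contains m = true := (hposc m).mpr hmf
      rw [PySem.Dict.contains_eq_isSome_get?] at hposm
      obtain ⟨i, hgi⟩ := Option.isSome_iff_exists.mp hposm
      obtain ⟨hi0, hilt, hig⟩ := hposg m i hgi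
      have hidx : PySem.List.index? mem (some m) = some i.toNat := by
        apply index?_eq_some_of_getElem
        · rw [hmem i.toNat (by omega), if_pos hilt, hig]
          rfl
        · intro i' hi'
          rw [hmem i' (by omega), if_pos (by omega)]
          intro hcon
          have : filled[i']? = some m := by
            cases hfi : filled[i']? with
            | none => rw [hfi] at hcon; simp at hcon
            | some y => simp [hfi] at hcon; simp [hcon]
          have := List.getElem?_inj (by omega) hnd (this.trans hig.symm)
          omega
      have hA : simular_mru_step (mem, ult, tempo) p =
          (mem.set i.toNat (some p), (ult.erase m).insert p (tempo + 1), tempo + 1) := by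
        simp only [simular_mru_step]
        rw [if_neg hnotmem, if_neg (fun h' => (by omega : ¬ filled.length < quadros.toNat) (noneiff.mp h'))]
        simp only [hmax, hidx]
        rfl
      have hB : simular_mru_alt_step quadros (frames, pos, fill, mru) p =
          (frames.set i.toNat (some p), (pos.erase m).insert p i, fill, some p) := by
        simp only [simular_mru_alt_step]
        rw [hposf]
        simp only [Bool.false_eq_true, if_false]
        rw [if_neg (by rw [hfill]; omega)]
        simp only [hmru, hgi]
      rw [hA, hB]
      simp only [MruInv]
      have hpne : p ≠ m := fun e => hin (e ▸ hmf)
      refine ⟨filled.set i.toNat p, by rw [hfr], by simp [hlen], by simp; omega,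
        List.Nodup.set hnd hin, by simp [hfill], ?_, ?_, ?_, ?_, ?_, ?_, ?_⟩
      · intro i' hiq
        rw [List.getElem?_set, List.getElem?_set]
        by_cases he : i.toNat = i'
        · rw [if_pos he, if_pos he, if_pos (by omega), if_pos (by simp; omega), if_pos (by omega)]
          rfl
        · rw [if_neg he, if_neg he, hmem i' hiq]
          simp only [List.length_set]
      · intro q'
        rw [PySem.Dict.contains_insert]
        constructor
        · intro h'
          rcases Bool.or_eq_true_iff.mp h' with h' | h'
          · have : q' = p := by simpa using h'
            subst this
            exact List.mem_iff_getElem?.mpr ⟨i.toNat, by rw [List.getElem?_set, if_pos rfl, if_pos (by omega)]⟩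
          · rw [PySem.Dict.contains_eq_isSome_get?, dict_get?_erase] at h'
            by_cases hqm : q' = m
            · rw [if_pos hqm] at h'; simp at h'
            · rw [if_neg hqm] at h'
              have hq'f : q' ∈ filled := (hposc q').mp (by rw [PySem.Dict.contains_eq_isSome_get?]; exact h')
              obtain ⟨j, hj⟩ := List.mem_iff_getElem?.mp hq'f
              have hjlen : j < filled.length := by
                by_contra hge
                rw [List.getElem?_eq_none (by omega)] at hj
                simp at hj
              have hji : j ≠ i.toNat := by
                intro e
                rw [e, hig] at hj
                exact hqm (Option.some.inj hj).symm
              exact List.mem_iff_getElem?.mpr ⟨j, by rw [List.getElem?_set, if_neg (fun e => hji e.symm), hj]⟩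
        · intro h'
          obtain ⟨j, hj⟩ := List.mem_iff_getElem?.mp h'
          rw [List.getElem?_set] at hj
          by_cases he : i.toNat = j
          · rw [if_pos he, if_pos (by omega)] at hj
            have : q' = p := (Option.some.inj hj).symm
            simp [this]
          · rw [if_neg he] at hj
            have hq'f : q' ∈ filled := List.mem_iff_getElem?.mpr ⟨j, hj⟩
            have hjlen : j < filled.length := by
              by_contra hge
              rw [List.getElem?_eq_none (by omega)] at hj
              simp at hj
            have hqm : q' ≠ m := by
              intro e
              rw [e] at hj
              have := List.getElem?_inj hjlen hnd (hj.trans hig.symm)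
              omega
            refine Bool.or_eq_true_iff.mpr (Or.inr ?_)
            rw [PySem.Dict.contains_eq_isSome_get?, dict_get?_erase, if_neg hqm]
            rw [← PySem.Dict.contains_eq_isSome_get?]
            exact (hposc q').mpr hq'f
      · intro q' i' h'
        rw [PySem.Dict.get?_insert] at h'
        by_cases he : q' = p
        · rw [if_pos he] at h'
          have : i' = i := (Option.some.inj h').symm
          subst this
          refine ⟨hi0, by simp; omega, ?_⟩
          rw [List.getElem?_set, if_pos rfl, if_pos (by omega), he]
        · rw [if_neg he, dict_get?_erase] at h'
          by_cases hqm : q' = m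
          · rw [if_pos hqm] at h'; simp at h'
          · rw [if_neg hqm] at h'
            obtain ⟨h0, hlt, hget⟩ := hposg q' i' h'
            refine ⟨h0, by simp; omega, ?_⟩
            have hji : i'.toNat ≠ i.toNat := by
              intro e
              rw [e, hig] at hget
              exact hqm (Option.some.inj hget).symm
            rw [List.getElem?_set, if_neg (fun e => hji e.symm), hget]
      · intro q'
        rw [PySem.Dict.contains_insert]
        have herase : (ult.erase m).contains q' = true ↔ (q' ∈ filled ∧ q' ≠ m) := by
          rw [PySem.Dict.contains_eq_isSome_get?, dict_get?_erase]
          by_cases hqm : q' = m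
          · simp [hqm]
          · rw [if_neg hqm, ← PySem.Dict.contains_eq_isSome_get?]
            simp [hultc q', hqm]
        constructor
        · intro h'
          rcases Bool.or_eq_true_iff.mp h' with h' | h'
          · have : q' = p := by simpa using h'
            subst this
            exact List.mem_iff_getElem?.mpr ⟨i.toNat, by rw [List.getElem?_set, if_pos rfl, if_pos (by omega)]⟩
          · obtain ⟨hq'f, hqm⟩ := herase.mp h'
            obtain ⟨j, hj⟩ := List.mem_iff_getElem?.mp hq'f
            have hjlen : j < filled.length := by
              by_contra hge
              rw [List.getElem?_eq_none (by omega)] at hj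
              simp at hj
            have hji : j ≠ i.toNat := by
              intro e
              rw [e, hig] at hj
              exact hqm (Option.some.inj hj).symm
            exact List.mem_iff_getElem?.mpr ⟨j, by rw [List.getElem?_set, if_neg (fun e => hji e.symm), hj]⟩
        · intro h'
          obtain ⟨j, hj⟩ := List.mem_iff_getElem?.mp h'
          rw [List.getElem?_set] at hj
          by_cases he : i.toNat = j
          · rw [if_pos he, if_pos (by omega)] at hj
            have : q' = p := (Option.some.inj hj).symm
            simp [this]
          · rw [if_neg he] at hj
            have hq'f : q' ∈ filled := List.mem_iff_getElem?.mpr ⟨j, hj⟩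
            have hjlen : j < filled.length := by
              by_contra hge
              rw [List.getElem?_eq_none (by omega)] at hj
              simp at hj
            have hqm : q' ≠ m := by
              intro e
              rw [e] at hj
              have := List.getElem?_inj hjlen hnd (hj.trans hig.symm)
              omega
            exact Bool.or_eq_true_iff.mpr (Or.inr (herase.mpr ⟨hq'f, hqm⟩))
      · exact PySem.Dict.nodup_keys_insert _ p (tempo + 1) (dict_nodup_keys_erase ult m hunk)
      · intro p' t h'
        rw [PySem.Dict.get?_insert] at h'
        by_cases he : p' = p
        · rw [if_pos he] at h'
          have := Option.some.inj h'
          omega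
        · rw [if_neg he, dict_get?_erase] at h'
          by_cases hqm : p' = m
          · rw [if_pos hqm] at h'; simp at h'
          · rw [if_neg hqm] at h'
            have := htmp p' t h'
            omega
      · intro _
        refine ⟨p, tempo + 1, rfl, by rw [PySem.Dict.get?_insert, if_pos rfl], ?_⟩
        intro p' t h' hne'
        rw [PySem.Dict.get?_insert, if_neg hne', dict_get?_erase] at h'
        by_cases hqm : p' = m
        · rw [if_pos hqm] at h'; simp at h'
        · rw [if_neg hqm] at h'
          have := htmp p' t h'
          omega

theorem mru_fold (quadros : Int) (hq : 1 ≤ quadros) (seq : List Int)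
    (a : List (Option Int) × PySem.Dict Int Int × Int)
    (b : List (Option Int) × PySem.Dict Int Int × Int × Option Int)
    (h : MruInv quadros.toNat a b) :
    MruInv quadros.toNat (seq.foldl simular_mru_step a) (seq.foldl (simular_mru_alt_step quadros) b) := by
  induction seq generalizing a b with
  | nil => exact h
  | cons x t ih => exact ih _ _ (mru_step quadros hq a b x h)

-- ===== VERDICT (by name: the statement is the Claim_ definition above) =====
theorem simular_mru_spec : Claim_equal_simular_mru := by
  intro seq quadros _hdom hpre
  unfold Spec_simular_mru
  rcases hpre with rfl | hq
  · rfl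
  · have h0 : MruInv quadros.toNat
        (List.replicate quadros.toNat none, PySem.Dict.empty, 0)
        (List.replicate quadros.toNat none, PySem.Dict.empty, 0, none) := by
      refine ⟨[], rfl, by simp, by simp, by simp, by simp, ?_, ?_, ?_, ?_, by simp [PySem.Dict.keys, PySem.Dict.empty], ?_, by simp⟩
      · intro i hi
        simp [hi]
      · intro p; simp [PySem.Dict.contains_empty]
      · intro p i h; simp [PySem.Dict.get?_empty] at h
      · intro p; simp [PySem.Dict.contains_empty]
      · intro p t h; simp [PySem.Dict.get?_empty] at h
    have := mru_fold quadros hq seq _ _ h0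
    obtain ⟨filled, hframes, -⟩ := this
    exact hframes.symm
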